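-- pv_equiv track=rewrite | github.com/HACKMANV8/Dekha-Jayega | Hackman_agent-main/SagaAgent/services/export_service.py | format_plot_arcs_json
-- ===== SOURCE A (Python) =====
-- def format_plot_arcs_json(state: dict) -> dict:
--     """Format plot arcs data for JSON export"""
--     return {
--         "plot_arcs": [
--             {
--                 "arc_title": arc.get("arc_title", "Untitled Arc"),
--                 "arc_type": arc.get("arc_type", ""),
--                 "central_question": arc.get("central_question", ""),
--                 "theme": arc.get("theme", ""),
--                 "estimated_playtime": arc.get("estimated_playtime", ""),
--                 # Act 1
--                 "act1_hook": arc.get("act1_hook", ""),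
--                 "act1_worldbuilding": arc.get("act1_worldbuilding", ""),
--                 "act1_tutorial": arc.get("act1_tutorial", ""),
--                 "inciting_incident": arc.get("inciting_incident", ""),
--                 "act1_player_goal": arc.get("act1_player_goal", ""),
--                 "plot_point_1": arc.get("plot_point_1", ""),
--                 # Act 2
--                 "act2_progression": arc.get("act2_progression", ""),
--                 "act2_complications": arc.get("act2_complications", ""),
--                 "midpoint_twist": arc.get("midpoint_twist", ""),
--                 "act2_setbacks": arc.get("act2_setbacks", ""),
--                 "companion_development": arc.get("companion_development", ""),
--                 "plot_point_2": arc.get("plot_point_2", ""),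
--                 # Act 3
--                 "act3_final_prep": arc.get("act3_final_prep", ""),
--                 "climax_sequence": arc.get("climax_sequence", ""),
--                 "boss_mechanics": arc.get("boss_mechanics", ""),
--                 "resolution": arc.get("resolution", ""),
--                 "epilogue": arc.get("epilogue", ""),
--                 # Branching
--                 "major_choice_points": arc.get("major_choice_points", ""),
--                 "choice_consequences": arc.get("choice_consequences", ""),
--                 "conditional_content": arc.get("conditional_content", ""),
--                 "multiple_endings": arc.get("multiple_endings", "")
--             }
--             for arc in state.get("plot_arcs", [])
--         ]
--     }
-- ===== SOURCE B (Python) =====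
-- _ARC_DEFAULTS = {
--     "arc_title": "Untitled Arc",
--     "arc_type": "",
--     "central_question": "",
--     "theme": "",
--     "estimated_playtime": "",
--     "act1_hook": "",
--     "act1_worldbuilding": "",
--     "act1_tutorial": "",
--     "inciting_incident": "",
--     "act1_player_goal": "",
--     "plot_point_1": "",
--     "act2_progression": "",
--     "act2_complications": "",
--     "midpoint_twist": "",
--     "act2_setbacks": "",
--     "companion_development": "",
--     "plot_point_2": "",
--     "act3_final_prep": "",
--     "climax_sequence": "",
--     "boss_mechanics": "",
--     "resolution": "",
--     "epilogue": "",
--     "major_choice_points": "",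
--     "choice_consequences": "",
--     "conditional_content": "",
--     "multiple_endings": "",
-- }
--
--
-- def _merge_arc(arc):
--     """One pass over the arc's own items: overwrite a defaults copy, dropping unknown keys."""
--     merged = dict(_ARC_DEFAULTS)
--     for key, value in arc.items():
--         if key in merged:
--             merged[key] = value
--     return merged
--
--
-- def format_plot_arcs_json(state: dict) -> dict:
--     """Format plot arcs data for JSON export (merge each arc into a defaults template)."""
--     return {"plot_arcs": [_merge_arc(arc) for arc in state.get("plot_arcs", [])]}
-- ===== Notes on version B (the rewrite author's own statement) =====
-- stated objective: alternative
-- what changed: Instead of building each output dict by 26 per-field .get lookups into the arc, B copies a defaults template once and does a single pass over the arc's own items, overwriting known fields and discarding unknown keys; what is iterated is the arc's data, not the field schema.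
import Mathlib
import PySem

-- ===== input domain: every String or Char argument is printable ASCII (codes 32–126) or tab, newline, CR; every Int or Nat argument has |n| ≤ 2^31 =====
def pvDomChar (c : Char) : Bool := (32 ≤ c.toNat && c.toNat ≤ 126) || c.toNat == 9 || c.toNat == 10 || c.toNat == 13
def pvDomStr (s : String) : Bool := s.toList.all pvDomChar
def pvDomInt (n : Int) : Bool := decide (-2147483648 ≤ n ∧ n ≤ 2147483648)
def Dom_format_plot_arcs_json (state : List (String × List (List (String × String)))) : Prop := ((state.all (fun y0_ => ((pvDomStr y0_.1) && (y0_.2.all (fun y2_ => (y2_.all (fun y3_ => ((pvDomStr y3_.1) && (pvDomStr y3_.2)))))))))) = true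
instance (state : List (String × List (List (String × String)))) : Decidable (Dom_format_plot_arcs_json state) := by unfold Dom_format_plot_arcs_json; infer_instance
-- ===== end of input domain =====

-- B replaces A's 26 per-field lookups by one pass over each arc's own items merged into a defaults
-- template (objective: alternative algorithm, same cost).


-- ===== PORT A =====
-- A builds each arc's dict with 26 inline literal .get calls.
def pvFormatArcA (arc : List (String × String)) : List (String × String) :=
  [("arc_title", PySem.Dict.getD ⟨arc⟩ "arc_title" "Untitled Arc"),
    ("arc_type", PySem.Dict.getD ⟨arc⟩ "arc_type" ""),
    ("central_question", PySem.Dict.getD ⟨arc⟩ "central_question" ""),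
    ("theme", PySem.Dict.getD ⟨arc⟩ "theme" ""),
    ("estimated_playtime", PySem.Dict.getD ⟨arc⟩ "estimated_playtime" ""),
    ("act1_hook", PySem.Dict.getD ⟨arc⟩ "act1_hook" ""),
    ("act1_worldbuilding", PySem.Dict.getD ⟨arc⟩ "act1_worldbuilding" ""),
    ("act1_tutorial", PySem.Dict.getD ⟨arc⟩ "act1_tutorial" ""),
    ("inciting_incident", PySem.Dict.getD ⟨arc⟩ "inciting_incident" ""),
    ("act1_player_goal", PySem.Dict.getD ⟨arc⟩ "act1_player_goal" ""),
    ("plot_point_1", PySem.Dict.getD ⟨arc⟩ "plot_point_1" ""),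
    ("act2_progression", PySem.Dict.getD ⟨arc⟩ "act2_progression" ""),
    ("act2_complications", PySem.Dict.getD ⟨arc⟩ "act2_complications" ""),
    ("midpoint_twist", PySem.Dict.getD ⟨arc⟩ "midpoint_twist" ""),
    ("act2_setbacks", PySem.Dict.getD ⟨arc⟩ "act2_setbacks" ""),
    ("companion_development", PySem.Dict.getD ⟨arc⟩ "companion_development" ""),
    ("plot_point_2", PySem.Dict.getD ⟨arc⟩ "plot_point_2" ""),
    ("act3_final_prep", PySem.Dict.getD ⟨arc⟩ "act3_final_prep" ""),
    ("climax_sequence", PySem.Dict.getD ⟨arc⟩ "climax_sequence" ""),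
    ("boss_mechanics", PySem.Dict.getD ⟨arc⟩ "boss_mechanics" ""),
    ("resolution", PySem.Dict.getD ⟨arc⟩ "resolution" ""),
    ("epilogue", PySem.Dict.getD ⟨arc⟩ "epilogue" ""),
    ("major_choice_points", PySem.Dict.getD ⟨arc⟩ "major_choice_points" ""),
    ("choice_consequences", PySem.Dict.getD ⟨arc⟩ "choice_consequences" ""),
    ("conditional_content", PySem.Dict.getD ⟨arc⟩ "conditional_content" ""),
    ("multiple_endings", PySem.Dict.getD ⟨arc⟩ "multiple_endings" "")]

def format_plot_arcs_json (state : List (String × List (List (String × String)))) : List (String × List (List (String × String))) :=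
  [("plot_arcs", (PySem.Dict.getD ⟨state⟩ "plot_arcs" []).map pvFormatArcA)]

-- ===== PORT B =====
-- B: the _ARC_DEFAULTS template dict (a Python dict literal; keys are distinct).
def pvArcDefaults : PySem.Dict String String := ⟨[
  ("arc_title", "Untitled Arc"),
  ("arc_type", ""),
  ("central_question", ""),
  ("theme", ""),
  ("estimated_playtime", ""),
  ("act1_hook", ""),
  ("act1_worldbuilding", ""),
  ("act1_tutorial", ""),
  ("inciting_incident", ""),
  ("act1_player_goal", ""),
  ("plot_point_1", ""),
  ("act2_progression", ""),
  ("act2_complications", ""),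
  ("midpoint_twist", ""),
  ("act2_setbacks", ""),
  ("companion_development", ""),
  ("plot_point_2", ""),
  ("act3_final_prep", ""),
  ("climax_sequence", ""),
  ("boss_mechanics", ""),
  ("resolution", ""),
  ("epilogue", ""),
  ("major_choice_points", ""),
  ("choice_consequences", ""),
  ("conditional_content", ""),
  ("multiple_endings", "")]⟩

-- _merge_arc: one pass over the arc's items, overwriting keys the template contains.
def pvMergeArc (arc : List (String × String)) : PySem.Dict String String :=
  arc.foldl
    (fun merged kv => if merged.contains kv.1 then merged.insert kv.1 kv.2 else merged)
    pvArcDefaults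

def format_plot_arcs_json_alt (state : List (String × List (List (String × String)))) : List (String × List (List (String × String))) :=
  [("plot_arcs", (PySem.Dict.getD ⟨state⟩ "plot_arcs" []).map (fun arc => (pvMergeArc arc).items))]

-- ===== PRECONDITION & SPEC =====
-- Pre_ excludes states in which some arc association list repeats a key: such a list corresponds to
-- no Python dict (Python dict keys are unique), and there A's first-match lookup vs B's last-write
-- merge are both accidental choices.
def Pre_format_plot_arcs_json (state : List (String × List (List (String × String)))) : Prop :=
  ∀ kv ∈ state, ∀ arc ∈ kv.2, (arc.map Prod.fst).Nodup
instance (state : List (String × List (List (String × String)))) : Decidable (Pre_format_plot_arcs_json state) := by unfold Pre_format_plot_arcs_json; infer_instance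

def pvWitness_format_plot_arcs_json : (List (String × List (List (String × String)))) :=
  [("plot_arcs", [[("arc_title", "The Fall"), ("extra", "x")], []])]

def Spec_format_plot_arcs_json (state : List (String × List (List (String × String)))) (out : List (String × List (List (String × String)))) : Prop := out = format_plot_arcs_json_alt state
instance (state : List (String × List (List (String × String)))) (out : List (String × List (List (String × String)))) : Decidable (Spec_format_plot_arcs_json state out) := by unfold Spec_format_plot_arcs_json; infer_instance

-- ===== CLAIM =====
def Claim_equal_format_plot_arcs_json : Prop := ∀ (state : List (String × List (List (String × String)))), Dom_format_plot_arcs_json state → Pre_format_plot_arcs_json state → Spec_format_plot_arcs_json state (format_plot_arcs_json state)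

-- ===== LEMMAS AND PROOFS =====

-- The merge loop never adds a key: it only overwrites keys the dict already contains.
theorem pv_keys_fold (arc : List (String × String)) :
    ∀ D : PySem.Dict String String,
      (arc.foldl (fun merged kv =>
          if merged.contains kv.1 then merged.insert kv.1 kv.2 else merged) D).keys = D.keys := by
  induction arc with
  | nil => intro D; rfl
  | cons p rest ih =>
      intro D
      simp only [List.foldl_cons]
      by_cases h : D.contains p.1
      · rw [if_pos h, ih, PySem.Dict.keys_insert_of_contains D p.2 h]
      · rw [if_neg h, ih]

-- Lookup in the merged dict, for a key the template contains and an arc list without repeated keys: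
-- the last write wins in the loop, the first match wins in Dict.get?; Nodup makes them agree.
theorem pv_getD_fold (arc : List (String × String)) (hnd : (arc.map Prod.fst).Nodup) :
    ∀ (D : PySem.Dict String String) (k : String), D.contains k = true →
      (arc.foldl (fun merged kv =>
          if merged.contains kv.1 then merged.insert kv.1 kv.2 else merged) D).getD k "" =
        PySem.Dict.getD ⟨arc⟩ k (D.getD k "") := by
  induction arc with
  | nil => intro D k _; rfl
  | cons p rest ih =>
      intro D k hc
      obtain ⟨k0, v0⟩ := p
      simp only [List.map_cons, List.nodup_cons] at hnd
      simp only [List.foldl_cons]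
      have hcons : PySem.Dict.getD (⟨(k0, v0) :: rest⟩ : PySem.Dict String String) k (D.getD k "") =
          if k0 == k then v0 else PySem.Dict.getD (⟨rest⟩ : PySem.Dict String String) k (D.getD k "") := by
        rw [PySem.Dict.getD_eq_get?_getD, PySem.Dict.get?_mk_cons]
        by_cases h : k0 == k
        · simp [h]
        · simp [h, PySem.Dict.getD_eq_get?_getD]
      rw [hcons]
      by_cases h0 : D.contains k0
      · rw [if_pos h0]
        by_cases hk : k = k0
        · subst hk
          have hrest : PySem.Dict.get? (⟨rest⟩ : PySem.Dict String String) k = none := by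
            rw [PySem.Dict.get?_eq_none_iff_not_mem_keys]
            simpa [PySem.Dict.keys] using hnd.1
          rw [ih hnd.2 _ k (PySem.Dict.contains_insert_self D k v0),
              PySem.Dict.getD_insert_self]
          simp [PySem.Dict.getD_eq_get?_getD, hrest]
        · rw [ih hnd.2 _ k (by rw [PySem.Dict.contains_insert]; simp [hc]),
              PySem.Dict.getD_insert_of_ne D v0 "" hk]
          have hne : (k0 == k) = false := beq_eq_false_iff_ne.mpr (fun h => hk h.symm)
          rw [hne]; simp
      · rw [if_neg h0, ih hnd.2 D k hc]
        have hne : (k0 == k) = false := by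
          by_cases hk : k0 = k
          · subst hk; exact absurd hc h0
          · simpa using hk
        rw [hne]; simp

-- Per arc (no repeated keys): the merged dict's items are exactly A's 26-entry literal list.
theorem pv_merge_items (arc : List (String × String)) (hnd : (arc.map Prod.fst).Nodup) :
    (pvMergeArc arc).items = pvFormatArcA arc := by
  have hkeys := pv_keys_fold arc pvArcDefaults
  have hndk : (pvMergeArc arc).keys.Nodup := by
    rw [pvMergeArc, hkeys]; decide
  rw [PySem.Dict.items_eq_map_keys _ hndk ""]
  show ((pvMergeArc arc).keys.map fun k => (k, (pvMergeArc arc).getD k "")) = _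
  rw [pvMergeArc, hkeys]
  have hg := pv_getD_fold arc hnd pvArcDefaults
  show (pvArcDefaults.keys.map fun k =>
      (k, (arc.foldl (fun merged kv =>
        if merged.contains kv.1 then merged.insert kv.1 kv.2 else merged) pvArcDefaults).getD k "")) = _
  simp only [show pvArcDefaults.keys = ["arc_title", "arc_type", "central_question", "theme",
      "estimated_playtime", "act1_hook", "act1_worldbuilding", "act1_tutorial", "inciting_incident",
      "act1_player_goal", "plot_point_1", "act2_progression", "act2_complications", "midpoint_twist",
      "act2_setbacks", "companion_development", "plot_point_2", "act3_final_prep", "climax_sequence",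
      "boss_mechanics", "resolution", "epilogue", "major_choice_points", "choice_consequences",
      "conditional_content", "multiple_endings"] from rfl, List.map_cons, List.map_nil]
  rw [hg "arc_title" rfl, hg "arc_type" rfl, hg "central_question" rfl, hg "theme" rfl,
      hg "estimated_playtime" rfl, hg "act1_hook" rfl, hg "act1_worldbuilding" rfl,
      hg "act1_tutorial" rfl, hg "inciting_incident" rfl, hg "act1_player_goal" rfl,
      hg "plot_point_1" rfl, hg "act2_progression" rfl, hg "act2_complications" rfl,
      hg "midpoint_twist" rfl, hg "act2_setbacks" rfl, hg "companion_development" rfl,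
      hg "plot_point_2" rfl, hg "act3_final_prep" rfl, hg "climax_sequence" rfl,
      hg "boss_mechanics" rfl, hg "resolution" rfl, hg "epilogue" rfl,
      hg "major_choice_points" rfl, hg "choice_consequences" rfl, hg "conditional_content" rfl,
      hg "multiple_endings" rfl]
  rfl

-- Every arc processed comes from one of state's values (or the [] default).
theorem pv_mem_getD_state (state : List (String × List (List (String × String))))
    (arc : List (String × String))
    (h : arc ∈ PySem.Dict.getD (⟨state⟩ : PySem.Dict String (List (List (String × String)))) "plot_arcs" []) :
    ∃ kv ∈ state, arc ∈ kv.2 := by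
  rw [PySem.Dict.getD_eq_get?_getD] at h
  cases hg : PySem.Dict.get? (⟨state⟩ : PySem.Dict String (List (List (String × String)))) "plot_arcs" with
  | none => rw [hg] at h; simp at h
  | some v =>
      rw [hg] at h
      exact ⟨("plot_arcs", v), PySem.Dict.mem_items_of_get?_eq_some _ hg, h⟩

-- ===== VERDICT =====
theorem format_plot_arcs_json_spec : Claim_equal_format_plot_arcs_json := by
  intro state _ hpre
  unfold Spec_format_plot_arcs_json format_plot_arcs_json format_plot_arcs_json_alt
  refine congrArg (fun l => [("plot_arcs", l)]) ?_
  refine List.map_congr_left (fun arc harc => ?_)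
  obtain ⟨kv, hkv, hmem⟩ := pv_mem_getD_state state arc harc
  exact (pv_merge_items arc (hpre kv hkv arc hmem)).symm
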